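-- pv_equiv track=rewrite | github.com/gassmd/practice | arrays/common_words_one_occurence.py | countWords1
-- ===== SOURCE A (Python) =====
-- import collections
--
-- def countWords1(words1: list[str], words2: list[str]) -> int:         # O(n) time, O(n) space
--     c1 = collections.Counter(words1)
--     c2 = collections.Counter(words2)
--
--     count = 0
--     for x in c1.keys():
--         if c1[x] == 1 and c2[x] == 1:
--             count += 1
--     return count
-- ===== SOURCE B (Python) =====
-- def countWords1(words1: list[str], words2: list[str]) -> int:
--     # Sort each list, extract words whose run has length 1 (i.e. occur exactly once),
--     # then count common words with a two-pointer merge of the two strictly increasing lists.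
--     u1 = _uniques(sorted(words1))
--     u2 = _uniques(sorted(words2))
--     i = j = cnt = 0
--     while i < len(u1) and j < len(u2):
--         a, b = u1[i], u2[j]
--         if a == b:
--             cnt += 1
--             i += 1
--             j += 1
--         elif a < b:
--             i += 1
--         else:
--             j += 1
--     return cnt
--
--
-- def _uniques(s: list[str]) -> list[str]:
--     # s is sorted; return the words whose run length is exactly 1, in order.
--     out = []
--     i, n = 0, len(s)
--     while i < n:
--         j = i + 1
--         while j < n and s[j] == s[i]:
--             j += 1
--         if j == i + 1:
--             out.append(s[i])
--         i = j
--     return out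
-- ===== Notes on version B (the rewrite author's own statement) =====
-- stated objective: alternative
-- what changed: Replaces the hash-counter probing scan with a comparison-based algorithm: sort each list, extract words whose run length is exactly 1, and merge the two strictly increasing unique lists with two pointers, counting matches.
import Mathlib
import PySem

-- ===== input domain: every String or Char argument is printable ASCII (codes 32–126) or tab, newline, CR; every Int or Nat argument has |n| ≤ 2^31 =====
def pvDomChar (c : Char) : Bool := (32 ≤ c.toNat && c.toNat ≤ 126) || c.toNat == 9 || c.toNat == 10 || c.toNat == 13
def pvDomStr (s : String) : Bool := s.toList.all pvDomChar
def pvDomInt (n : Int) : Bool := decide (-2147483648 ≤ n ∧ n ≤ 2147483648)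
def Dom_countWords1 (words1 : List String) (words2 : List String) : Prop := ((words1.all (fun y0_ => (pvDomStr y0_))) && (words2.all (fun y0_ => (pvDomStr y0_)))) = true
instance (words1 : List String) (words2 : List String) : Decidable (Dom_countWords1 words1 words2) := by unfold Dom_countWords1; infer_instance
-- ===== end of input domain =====

-- B replaces the hash-counter probing scan with sort + run-length-1 extraction + a two-pointer merge of the two strictly increasing unique lists (alternative algorithm, not claimed faster).

-- ===== PORT A =====
def countWords1 (words1 : List String) (words2 : List String) : Int :=
  let c1 := PySem.Dict.counter words1
  let c2 := PySem.Dict.counter words2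
  c1.keys.foldl (fun count x =>
    if c1.getD x 0 == 1 && c2.getD x 0 == 1 then count + 1 else count) 0

-- ===== PORT B =====
-- _uniques: scan the sorted list run by run, keep words whose run length is exactly 1.
def pvUniques : List String → List String
  | [] => []
  | x :: xs =>
    let rest := xs.dropWhile (fun y => y == x)
    if (xs.takeWhile (fun y => y == x)).length == 0 then x :: pvUniques rest
    else pvUniques rest
  termination_by l => l.length
  decreasing_by
    all_goals
      have := List.length_dropWhile_le (fun y => y == x) xs
      simp only [List.length_cons]
      omega

-- the two-pointer merge counting common elements of two strictly increasing lists
def pvMerge : List String → List String → Int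
  | [], _ => 0
  | _ :: _, [] => 0
  | a :: as, b :: bs =>
    if a == b then 1 + pvMerge as bs
    else if a < b then pvMerge as (b :: bs)
    else pvMerge (a :: as) bs
  termination_by u v => u.length + v.length

def countWords1_alt (words1 : List String) (words2 : List String) : Int :=
  let u1 := pvUniques (PySem.List.sorted words1 (fun x => x))
  let u2 := pvUniques (PySem.List.sorted words2 (fun x => x))
  pvMerge u1 u2

-- ===== PRECONDITION & SPEC =====
def Spec_countWords1 (words1 : List String) (words2 : List String) (out : Int) : Prop := out = countWords1_alt words1 words2
instance (words1 : List String) (words2 : List String) (out : Int) : Decidable (Spec_countWords1 words1 words2 out) := by unfold Spec_countWords1; infer_instance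

-- ===== CLAIM (what is proved, stated in full; the proofs are below) =====
def Claim_equal_countWords1 : Prop := ∀ (words1 : List String) (words2 : List String), Dom_countWords1 words1 words2 → Spec_countWords1 words1 words2 (countWords1 words1 words2)

-- ===== LEMMAS AND PROOFS =====

-- A's loop counts the elements of the key list satisfying the predicate.
theorem pv_foldl_count {α : Type} (p : α → Bool) (l : List α) (a : Int) :
    l.foldl (fun acc x => if p x then acc + 1 else acc) a = a + ((l.filter p).length : Int) := by
  induction l generalizing a with
  | nil => simp
  | cons x xs ih =>
    by_cases h : p x = true
    · simp [h, ih]; ring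
    · simp [h, ih]

-- pvUniques on a sorted list: members are exactly the words of count 1, and the output is strictly increasing.
theorem pv_uniques_spec (s : List String) (hs : s.Pairwise (· ≤ ·)) :
    (∀ y, y ∈ pvUniques s ↔ s.count y = 1) ∧ (pvUniques s).Pairwise (· < ·) := by
  induction hn : s.length using Nat.strong_induction_on generalizing s with
  | _ n ih =>
  cases s with
  | nil => simp [pvUniques]
  | cons x xs =>
    have hpw := hs
    rw [List.pairwise_cons] at hpw
    obtain ⟨hxle, hxs⟩ := hpw
    set run := xs.takeWhile (fun y => y == x) with hrun
    set rest := xs.dropWhile (fun y => y == x) with hrest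
    have hsplit : run ++ rest = xs := List.takeWhile_append_dropWhile
    have hrest_sorted : rest.Pairwise (· ≤ ·) := by
      have : rest.Sublist xs := List.dropWhile_sublist _
      exact hxs.sublist this
    have hrest_len : rest.length ≤ xs.length := List.length_dropWhile_le _ _
    have hrec := ih rest.length (by subst hn; simp; omega) rest hrest_sorted rfl
    -- every element of run equals x
    have hrun_eq : ∀ y ∈ run, y = x := by
      intro y hy
      have := List.mem_takeWhile_imp hy
      simpa using this
    -- x is not in rest
    have hx_rest : x ∉ rest := by
      intro hmem
      cases hres : rest with
      | nil => simp [hres] at hmem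
      | cons d ds =>
        have hd : ¬ (d == x) = true := by
          have := List.head?_dropWhile_not (fun y => y == x) xs
          rw [← hrest, hres] at this
          simpa using this
        have hdx : d ≠ x := by simpa using hd
        have hdm : d ∈ xs := by
          rw [← hsplit]; exact List.mem_append_right _ (by simp [hres])
        have hxd : x ≤ d := hxle d hdm
        rw [hres] at hmem
        rcases List.mem_cons.mp hmem with h | h
        · exact hdx h.symm
        · have : d ≤ x := by
            rw [hres] at hrest_sorted
            exact (List.pairwise_cons.mp hrest_sorted).1 x h
          exact hdx (le_antisymm this hxd)
    -- counts
    have hcount_x : (x :: xs).count x = 1 + run.length := by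
      rw [List.count_cons_self, ← hsplit, List.count_append]
      have h1 : run.count x = run.length := by
        rw [List.count_eq_length]
        intro y hy; rw [hrun_eq y hy]
      have h2 : rest.count x = 0 := List.count_eq_zero.mpr hx_rest
      omega
    have hcount_ne : ∀ y, y ≠ x → (x :: xs).count y = rest.count y := by
      intro y hy
      have hhead : (x :: xs).count y = xs.count y := by
        simp [Ne.symm hy]
      rw [hhead, ← hsplit, List.count_append]
      have : run.count y = 0 := by
        rw [List.count_eq_zero]
        intro hmem; exact hy (hrun_eq y hmem)
      omega
    -- membership in pvUniques rest implies being in rest (count ≥ 1)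
    have hmem_rest : ∀ y ∈ pvUniques rest, y ∈ rest := by
      intro y hy
      have := (hrec.1 y).mp hy
      exact List.count_pos_iff.mp (by omega)
    by_cases hz : run.length = 0
    · -- run empty: x kept
      have hstep : pvUniques (x :: xs) = x :: pvUniques rest := by
        rw [pvUniques]; simp [← hrun, ← hrest, hz]
      constructor
      · intro y
        rw [hstep, List.mem_cons]
        by_cases hyx : y = x
        · subst hyx
          have hxnot : y ∉ pvUniques rest := fun h => hx_rest (hmem_rest y h)
          simp [hcount_x, hz, hxnot]
        · rw [hcount_ne y hyx, ← hrec.1 y]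
          simp [hyx]
      · rw [hstep, List.pairwise_cons]
        refine ⟨?_, hrec.2⟩
        intro y hy
        have hyr : y ∈ rest := hmem_rest y hy
        have hyxs : y ∈ xs := by rw [← hsplit]; exact List.mem_append_right _ hyr
        have hle : x ≤ y := hxle y hyxs
        have hne : y ≠ x := fun h => hx_rest (h ▸ hyr)
        exact lt_of_le_of_ne hle (Ne.symm hne)
    · -- run nonempty: x dropped
      have hstep : pvUniques (x :: xs) = pvUniques rest := by
        rw [pvUniques]; simp [← hrun, ← hrest, hz]
      refine ⟨?_, hstep ▸ hrec.2⟩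
      intro y
      rw [hstep]
      by_cases hyx : y = x
      · subst hyx
        constructor
        · intro h; exact absurd (hmem_rest _ h) hx_rest
        · intro h; rw [hcount_x] at h; omega
      · rw [hcount_ne y hyx]; exact hrec.1 y

-- the merge of two strictly increasing lists counts the elements of the first present in the second
theorem pv_merge_spec (u v : List String) (hu : u.Pairwise (· < ·)) (hv : v.Pairwise (· < ·)) :
    pvMerge u v = ((u.filter (fun a => v.contains a)).length : Int) := by
  induction hn : u.length + v.length using Nat.strong_induction_on generalizing u v with
  | _ n ih =>
  match u, v with
  | [], v => simp [pvMerge]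
  | a :: as, [] => simp [pvMerge]
  | a :: as, b :: bs =>
    have hua := List.pairwise_cons.mp hu
    have hvb := List.pairwise_cons.mp hv
    by_cases hab : a = b
    · subst hab
      have h1 : pvMerge (a :: as) (a :: bs) = 1 + pvMerge as bs := by
        rw [pvMerge]; simp
      rw [h1, ih (as.length + bs.length) (by subst hn; simp; omega) as bs hua.2 hvb.2 rfl]
      have hfc : as.filter (fun y => (a :: bs).contains y) = as.filter (fun y => bs.contains y) := by
        apply List.filter_congr
        intro y hy
        have hne : y ≠ a := ne_of_gt (hua.1 y hy)
        simp [hne]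
      have hfl : (a :: as).filter (fun y => (a :: bs).contains y)
          = a :: as.filter (fun y => bs.contains y) := by
        rw [List.filter_cons, if_pos (by simp), hfc]
      rw [hfl]
      push_cast [List.length_cons]
      ring
    · by_cases halt : a < b
      · have h1 : pvMerge (a :: as) (b :: bs) = pvMerge as (b :: bs) := by
          rw [pvMerge]; simp [hab, halt]
        rw [h1, ih (as.length + (b :: bs).length) (by subst hn; simp) as (b :: bs) hua.2 hv rfl]
        have hnotin : ((b :: bs).contains a) = false := by
          simp only [List.contains_eq_mem, decide_eq_false_iff_not]
          intro hmem
          rcases List.mem_cons.mp hmem with h | h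
          · exact hab h
          · exact absurd (lt_trans halt (hvb.1 a h)) (lt_irrefl a)
        have hfl : (a :: as).filter (fun y => (b :: bs).contains y)
            = as.filter (fun y => (b :: bs).contains y) := by
          rw [List.filter_cons, if_neg (by rw [hnotin]; simp)]
        rw [hfl]
      · have hblt : b < a := by
          rcases lt_trichotomy a b with h | h | h
          · exact absurd h halt
          · exact absurd h hab
          · exact h
        have h1 : pvMerge (a :: as) (b :: bs) = pvMerge (a :: as) bs := by
          rw [pvMerge]; simp [hab, halt]
        rw [h1, ih ((a :: as).length + bs.length) (by subst hn; simp) (a :: as) bs hu hvb.2 rfl]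
        apply congrArg
        apply congrArg
        apply List.filter_congr
        intro y hy
        have hby : b < y := by
          rcases List.mem_cons.mp hy with h | h
          · exact h ▸ hblt
          · exact lt_trans hblt (hua.1 y h)
        have hne : y ≠ b := ne_of_gt hby
        simp [hne]

-- ===== VERDICT (by name: the statement is the Claim_ definition above) =====
theorem countWords1_spec : Claim_equal_countWords1 := by
  intro w1 w2 _
  unfold Spec_countWords1 countWords1 countWords1_alt
  simp only [PySem.Dict.keys_counter, PySem.Dict.getD_counter]
  rw [pv_foldl_count, Int.zero_add]
  set s1 := PySem.List.sorted w1 (fun x => x) with hs1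
  set s2 := PySem.List.sorted w2 (fun x => x) with hs2
  have hp1 : s1.Pairwise (· ≤ ·) := PySem.List.sorted_pairwise w1 (fun x => x)
  have hp2 : s2.Pairwise (· ≤ ·) := PySem.List.sorted_pairwise w2 (fun x => x)
  have hu1 := pv_uniques_spec s1 hp1
  have hu2 := pv_uniques_spec s2 hp2
  rw [pv_merge_spec _ _ hu1.2 hu2.2]
  apply congrArg
  -- both filtered lists are nodup with the same members, hence a permutation
  apply List.Perm.length_eq
  apply (List.perm_ext_iff_of_nodup ?_ ?_).mpr
  · intro y
    have hc1 : s1.count y = w1.count y := (PySem.List.sorted_perm w1 (fun x => x) false).count_eq y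
    have hc2 : s2.count y = w2.count y := (PySem.List.sorted_perm w2 (fun x => x) false).count_eq y
    rw [List.mem_filter, List.mem_filter]
    constructor
    · intro hmem
      obtain ⟨_, hcond⟩ := hmem
      rw [Bool.and_eq_true, beq_iff_eq, beq_iff_eq] at hcond
      have h1 : w1.count y = 1 := by omega
      have h2 : w2.count y = 1 := by omega
      refine ⟨(hu1.1 y).mpr (by omega), ?_⟩
      simp only [List.contains_eq_mem, decide_eq_true_eq]
      exact (hu2.1 y).mpr (by omega)
    · intro hmem
      obtain ⟨hmemU, hcond⟩ := hmem
      have h1 : w1.count y = 1 := by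
        have := (hu1.1 y).mp hmemU; omega
      have h2 : w2.count y = 1 := by
        have := (hu2.1 y).mp (by
          simpa only [List.contains_eq_mem, decide_eq_true_eq] using hcond)
        omega
      refine ⟨?_, ?_⟩
      · rw [PySem.Set.mem_ofList]
        exact List.count_pos_iff.mp (by omega)
      · rw [Bool.and_eq_true, beq_iff_eq, beq_iff_eq]
        omega
  · apply List.Nodup.filter
    exact (PySem.Set.nodup_ofList w1)
  · apply List.Nodup.filter
    exact hu1.2.nodup
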